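-- pv_equiv track=rewrite | github.com/GFNOrg/GFlowNet-EM | grammars/utils.py | get_nonbinary_tree
-- ===== SOURCE A (Python) =====
-- def get_nonbinary_tree(sent, tags, actions):
--     pointer = 0
--     tree = []
--     for action in actions:
--         if action[:2] == "NT":
--             node_label = action[:-1].split("NT")[1]
--             node_label = node_label.split("-")[0]
--             tree.append(node_label)
--         elif action == "REDUCE":
--             tree.append(")")
--         elif action == "SHIFT":
--             leaf = "(" + tags[pointer] + " " + sent[pointer] + ")"
--             pointer += 1
--             tree.append(leaf)
--         else:
--             assert False
--     assert pointer == len(sent)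
--     return " ".join(tree).replace(" )", ")")
-- ===== SOURCE B (Python) =====
-- def get_nonbinary_tree(sent, tags, actions):
--     # single pass: emit the output characters directly, collapsing " )" online
--     out = []
--     pointer = 0
--     first = True
--     for action in actions:
--         if action == "SHIFT":
--             piece = "(" + tags[pointer] + " " + sent[pointer] + ")"
--             pointer += 1
--         elif action == "REDUCE":
--             piece = ")"
--         else:
--             assert action.startswith("NT")
--             piece = action[2:-1].split("-")[0]
--         if first:
--             first = False
--         else:
--             out.append(" ")
--         for c in piece:
--             if c == ")" and out and out[-1] == " ":
--                 out[-1] = ")"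
--             else:
--                 out.append(c)
--     assert pointer == len(sent)
--     return "".join(out)
-- ===== Notes on version B (the rewrite author's own statement) =====
-- stated objective: alternative
-- what changed: A accumulates a list of pieces and then runs two more passes (' '.join and .replace(' )', ')')), while B emits the output characters in a single pass over the actions, collapsing each ' )' online via a last-character check, and parses NT labels directly as action[2:-1].split('-')[0]; Pre_ excludes only inputs on which A raises (an unrecognized action, an NT action too short for the label split, a SHIFT count different from len(sent), or tags shorter than sent).
-- intended difference: On NT actions whose label (the part of action[2:-1] before the first '-') itself contains 'NT', A's action[:-1].split('NT')[1] accidentally truncates the label at that inner 'NT' (e.g. on ([], [], ['NT(NTX)', 'REDUCE']) A returns '()'), while B keeps the whole label (returning '(NTX)'), which is the intended bracket label. — e.g. on get_nonbinary_tree([], [], ["NT(NTX)", "REDUCE"]): A returns "()", B returns "(NTX)"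
import Mathlib
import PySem

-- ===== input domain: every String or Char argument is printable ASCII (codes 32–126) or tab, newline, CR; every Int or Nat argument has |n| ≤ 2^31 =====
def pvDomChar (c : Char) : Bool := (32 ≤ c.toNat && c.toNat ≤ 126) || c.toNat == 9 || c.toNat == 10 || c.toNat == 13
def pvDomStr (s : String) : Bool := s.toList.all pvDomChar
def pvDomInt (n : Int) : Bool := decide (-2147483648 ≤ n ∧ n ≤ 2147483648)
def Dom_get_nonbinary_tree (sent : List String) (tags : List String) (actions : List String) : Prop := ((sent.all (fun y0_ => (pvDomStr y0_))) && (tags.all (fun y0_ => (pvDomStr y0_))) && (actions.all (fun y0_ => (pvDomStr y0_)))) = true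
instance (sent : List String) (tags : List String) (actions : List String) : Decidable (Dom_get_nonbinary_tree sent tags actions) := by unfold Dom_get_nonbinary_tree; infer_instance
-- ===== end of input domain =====

-- B builds the output in ONE pass (no piece list, no join pass, no replace pass), collapsing each
-- " )" online as characters are appended, and parses an NT label directly from action[2:-1];
-- return value only, neither version mutates its arguments.

-- ===== PORT A =====
-- A: collect the pieces in a list, then " ".join(tree).replace(" )", ")")
def pvStepA (sent : List String) (tags : List String) (st : Int × List String) (action : String) : Int × List String :=
  if PySem.Str.slice action none (some 2) = "NT" then
    let node_label := PySem.List.pyGetD ((PySem.Str.split? (PySem.Str.slice action none (some (-1))) "NT").getD []) 1 ""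
    let node_label := PySem.List.pyGetD ((PySem.Str.split? node_label "-").getD []) 0 ""
    (st.1, st.2 ++ [node_label])
  else if action = "REDUCE" then
    (st.1, st.2 ++ [")"])
  else if action = "SHIFT" then
    let leaf := String.ofList (['('] ++ (PySem.List.pyGetD tags st.1 "").toList ++ [' '] ++ (PySem.List.pyGetD sent st.1 "").toList ++ [')'])
    (st.1 + 1, st.2 ++ [leaf])
  else (st.1, st.2)

def get_nonbinary_tree (sent : List String) (tags : List String) (actions : List String) : String :=
  let st := actions.foldl (pvStepA sent tags) ((0 : Int), ([] : List String))
  PySem.Str.replace (PySem.Str.join " " st.2) " )" ")"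

-- ===== PORT B =====
-- out[-1]-aware append of one character (out is kept reversed: Python's list append = cons here)
def pvStep (r : List Char) (c : Char) : List Char :=
  if c = ')' ∧ r.head? = some ' ' then ')' :: r.tail else c :: r

def pvPush (r : List Char) (cs : List Char) : List Char := cs.foldl pvStep r

def pvStepB (sent : List String) (tags : List String) (st : Int × List Char × Bool) (action : String) : Int × List Char × Bool :=
  let pc :=
    if action = "SHIFT" then
      ((['('] ++ (PySem.List.pyGetD tags st.1 "").toList ++ [' '] ++ (PySem.List.pyGetD sent st.1 "").toList ++ [')']), st.1 + 1)
    else if action = "REDUCE" then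
      ([')'], st.1)
    else
      ((PySem.Chars.splitOn (PySem.List.slice action.toList (some 2) (some (-1))) ['-']).getD 0 [], st.1)
  let r1 := if st.2.2 then st.2.1 else ' ' :: st.2.1
  (pc.2, pvPush r1 pc.1, false)

def get_nonbinary_tree_alt (sent : List String) (tags : List String) (actions : List String) : String :=
  let st := actions.foldl (pvStepB sent tags) ((0 : Int), ([] : List Char), true)
  String.ofList st.2.1.reverse

-- ===== PRECONDITION & SPEC =====
-- Pre_ excludes exactly the inputs on which A raises: an action that is neither "SHIFT" nor "REDUCE"
-- nor an "NT…" action of length ≥ 3 (AssertionError / IndexError in the label split), a number of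
-- SHIFTs different from len(sent) (final assert / IndexError), or tags shorter than sent (IndexError).
def Pre_get_nonbinary_tree (sent : List String) (tags : List String) (actions : List String) : Prop :=
  (∀ a ∈ actions, a = "SHIFT" ∨ a = "REDUCE" ∨ (3 ≤ a.toList.length ∧ a.toList.take 2 = ['N', 'T'])) ∧
  actions.count "SHIFT" = sent.length ∧ sent.length ≤ tags.length
instance (sent : List String) (tags : List String) (actions : List String) : Decidable (Pre_get_nonbinary_tree sent tags actions) := by unfold Pre_get_nonbinary_tree; infer_instance

def pvWitness_get_nonbinary_tree : List String × List String × List String :=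
  (["dog"], ["NN"], ["NT(S)", "SHIFT", "REDUCE"])

-- On NT actions whose label (the part of action[2:-1] before the first '-') itself contains "NT",
-- A's action[:-1].split("NT")[1] accidentally truncates the label at that inner "NT", while B keeps
-- the whole label, which is the intended bracket label.
def D_get_nonbinary_tree (sent : List String) (tags : List String) (actions : List String) : Prop :=
  ∃ a ∈ actions, a.toList.take 2 = ['N', 'T'] ∧
    ['N', 'T'] <:+: ((a.toList.drop 2).dropLast.takeWhile (· != '-'))
instance (sent : List String) (tags : List String) (actions : List String) : Decidable (D_get_nonbinary_tree sent tags actions) := by unfold D_get_nonbinary_tree; infer_instance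

def Spec_get_nonbinary_tree (sent : List String) (tags : List String) (actions : List String) (out : String) : Prop := ¬ D_get_nonbinary_tree sent tags actions → out = get_nonbinary_tree_alt sent tags actions
instance (sent : List String) (tags : List String) (actions : List String) (out : String) : Decidable (Spec_get_nonbinary_tree sent tags actions out) := by unfold Spec_get_nonbinary_tree; infer_instance

def pvDiffWitness_get_nonbinary_tree : List String × List String × List String :=
  ([], [], ["NT(NTX)", "REDUCE"])
def pvDiffWitnessOut_get_nonbinary_tree : String × String := ("()", "(NTX)")

-- ===== CLAIM (what is proved, stated in full; the proofs are below) =====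
def Claim_unchanged_get_nonbinary_tree : Prop := ∀ (sent : List String) (tags : List String) (actions : List String), Dom_get_nonbinary_tree sent tags actions → Pre_get_nonbinary_tree sent tags actions → Spec_get_nonbinary_tree sent tags actions (get_nonbinary_tree sent tags actions)
def Claim_changed_get_nonbinary_tree : Prop := Dom_get_nonbinary_tree (pvDiffWitness_get_nonbinary_tree.1) (pvDiffWitness_get_nonbinary_tree.2.1) (pvDiffWitness_get_nonbinary_tree.2.2) ∧ Pre_get_nonbinary_tree (pvDiffWitness_get_nonbinary_tree.1) (pvDiffWitness_get_nonbinary_tree.2.1) (pvDiffWitness_get_nonbinary_tree.2.2) ∧ D_get_nonbinary_tree (pvDiffWitness_get_nonbinary_tree.1) (pvDiffWitness_get_nonbinary_tree.2.1) (pvDiffWitness_get_nonbinary_tree.2.2) ∧ get_nonbinary_tree (pvDiffWitness_get_nonbinary_tree.1) (pvDiffWitness_get_nonbinary_tree.2.1) (pvDiffWitness_get_nonbinary_tree.2.2) = pvDiffWitnessOut_get_nonbinary_tree.1 ∧ get_nonbinary_tree_alt (pvDiffWitness_get_nonbinary_tree.1) (pvDiffWitness_get_nonbinary_tree.2.1)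 (pvDiffWitness_get_nonbinary_tree.2.2) = pvDiffWitnessOut_get_nonbinary_tree.2 ∧ pvDiffWitnessOut_get_nonbinary_tree.1 ≠ pvDiffWitnessOut_get_nonbinary_tree.2
def Claim_exact_get_nonbinary_tree : Prop := ∀ (sent : List String) (tags : List String) (actions : List String), Dom_get_nonbinary_tree sent tags actions → Pre_get_nonbinary_tree sent tags actions → D_get_nonbinary_tree sent tags actions → get_nonbinary_tree sent tags actions ≠ get_nonbinary_tree_alt sent tags actions

-- ===== LEMMAS AND PROOFS =====

-- replace(" )", ")") deletes each space standing directly before a ')' (matches never overlap)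
def pvCollapse : List Char → List Char
  | [] => []
  | [c] => [c]
  | a :: b :: r => if a = ' ' ∧ b = ')' then ')' :: pvCollapse r else a :: pvCollapse (b :: r)

theorem pvCollapse_cons_of (c : Char) (r : List Char) (h : ¬(c = ' ' ∧ r.head? = some ')')) :
    pvCollapse (c :: r) = c :: pvCollapse r := by
  cases r with
  | nil => rfl
  | cons d t =>
    have : ¬(c = ' ' ∧ d = ')') := by simpa using h
    simp [pvCollapse, this]

theorem replace_go_collapse (fuel : Nat) : ∀ (l acc : List Char), l.length ≤ fuel →
    PySem.Chars.replace.go [' ', ')'] [')'] fuel l acc = acc.reverse ++ pvCollapse l := by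
  induction fuel with
  | zero =>
    intro l acc h
    have : l = [] := List.eq_nil_of_length_eq_zero (Nat.le_zero.mp h)
    subst this; simp [PySem.Chars.replace.go, pvCollapse]
  | succ n ih =>
    intro l acc h
    match l with
    | [] => simp [PySem.Chars.replace.go, pvCollapse]
    | c :: t =>
      rw [PySem.Chars.replace.go]
      by_cases hp : List.isPrefixOf [' ', ')'] (c :: t) = true
      · obtain ⟨d, r, rfl⟩ : ∃ d r, t = d :: r := by
          cases t with
          | nil => simp [List.isPrefixOf] at hp
          | cons d r => exact ⟨d, r, rfl⟩
        obtain ⟨hc, hd⟩ : c = ' ' ∧ d = ')' := by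
          constructor <;> · simp [List.isPrefixOf] at hp; tauto
        subst hc; subst hd
        simp only [hp, if_true]
        show PySem.Chars.replace.go [' ', ')'] [')'] n r (')' :: acc) = _
        rw [ih r (')' :: acc) (by simp at h ⊢; omega)]
        simp [pvCollapse]
      · simp only [hp, Bool.false_eq_true, if_false]
        rw [ih t (c :: acc) (by simpa using Nat.le_of_succ_le_succ h)]
        have hcc : pvCollapse (c :: t) = c :: pvCollapse t := by
          apply pvCollapse_cons_of
          intro ⟨h1, h2⟩
          cases t with
          | nil => simp at h2
          | cons d r =>
            have : d = ')' := by simpa using h2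
            subst h1; subst this
            simp [List.isPrefixOf] at hp
        simp [hcc]

theorem replace_eq_collapse (s : List Char) :
    PySem.Chars.replace s [' ', ')'] [')'] = pvCollapse s := by
  rw [PySem.Chars.replace]
  simp only [List.isEmpty_cons, if_false, Bool.false_eq_true]
  simpa using replace_go_collapse s.length s [] le_rfl

theorem pvCollapse_append (s t : List Char) (h : s.getLast? = some ' ' → t.head? ≠ some ')') :
    pvCollapse (s ++ t) = pvCollapse s ++ pvCollapse t := by
  induction s using pvCollapse.induct with
  | case1 => rfl
  | case2 c =>
    rw [List.singleton_append, pvCollapse_cons_of c t (by intro ⟨h1, h2⟩; exact h (by simp [h1]) h2)]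
    rfl
  | case3 a b r hab ih =>
    obtain ⟨ha, hb⟩ := hab
    subst ha; subst hb
    cases r with
    | nil =>
      simp only [List.cons_append, List.nil_append]
      rw [show pvCollapse (' ' :: ')' :: t) = ')' :: pvCollapse t from by simp [pvCollapse]]
      rfl
    | cons e r' =>
      have ih' := ih (by intro hl; exact h (by simpa using hl))
      simp only [List.cons_append] at ih' ⊢
      rw [show pvCollapse (' ' :: ')' :: e :: (r' ++ t)) = ')' :: pvCollapse (e :: (r' ++ t)) from by simp [pvCollapse]]
      rw [show pvCollapse (' ' :: ')' :: e :: r') = ')' :: pvCollapse (e :: r') from by simp [pvCollapse]]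
      simp [ih']
  | case4 a b r hab ih =>
    have hlast : (a :: b :: r).getLast? = (b :: r).getLast? := by simp
    have ih' := ih (by intro hl; exact h (by rw [hlast]; exact hl))
    simp only [List.cons_append] at ih' ⊢
    rw [pvCollapse_cons_of a (b :: (r ++ t)) (by intro ⟨h1, h2⟩; exact hab ⟨h1, by simpa using h2⟩)]
    rw [pvCollapse_cons_of a (b :: r) (by intro ⟨h1, h2⟩; exact hab ⟨h1, by simpa using h2⟩)]
    simp [ih']

theorem pvLast_cons (c : Char) (l : List Char) (h : l ≠ []) : (c :: l).getLast? = l.getLast? := by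
  cases l with
  | nil => exact absurd rfl h
  | cons e t => simp

theorem pvCollapse_ne_nil (s : List Char) (h : s ≠ []) : pvCollapse s ≠ [] := by
  induction s using pvCollapse.induct with
  | case1 => exact absurd rfl h
  | case2 c => simp [pvCollapse]
  | case3 a b r hab ih =>
    obtain ⟨ha, hb⟩ := hab; subst ha; subst hb
    simp [pvCollapse]
  | case4 a b r hab ih =>
    rw [pvCollapse_cons_of a (b :: r) (by intro ⟨h1, h2⟩; exact hab ⟨h1, by simpa using h2⟩)]
    simp

theorem pvCollapse_getLast? (s : List Char) : (pvCollapse s).getLast? = s.getLast? := by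
  induction s using pvCollapse.induct with
  | case1 => rfl
  | case2 c => rfl
  | case3 a b r hab ih =>
    obtain ⟨ha, hb⟩ := hab; subst ha; subst hb
    rw [show pvCollapse (' ' :: ')' :: r) = ')' :: pvCollapse r from by simp [pvCollapse]]
    cases hr : r with
    | nil => rfl
    | cons e r' =>
      have h1 : pvCollapse r ≠ [] := hr ▸ pvCollapse_ne_nil _ (by simp)
      rw [pvLast_cons _ _ (hr ▸ h1), ← hr, ih]
      simp [hr]
  | case4 a b r hab ih =>
    rw [pvCollapse_cons_of a (b :: r) (by intro ⟨h1, h2⟩; exact hab ⟨h1, by simpa using h2⟩)]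
    rw [pvLast_cons _ _ (pvCollapse_ne_nil _ (by simp)), ih]
    simp

theorem pvStep_collapse (s : List Char) (c : Char) :
    pvStep (pvCollapse s).reverse c = (pvCollapse (s ++ [c])).reverse := by
  have hhead : (pvCollapse s).reverse.head? = s.getLast? := by
    rw [List.head?_reverse, pvCollapse_getLast?]
  by_cases hc : c = ')' ∧ s.getLast? = some ' '
  · obtain ⟨hc1, hc2⟩ := hc
    subst hc1
    obtain ⟨s0, rfl⟩ : ∃ s0, s = s0 ++ [' '] := by
      have hne : s ≠ [] := by intro h; simp [h] at hc2
      refine ⟨s.dropLast, ?_⟩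
      exact (List.dropLast_append_getLast? ' ' hc2).symm
    have e1 : pvCollapse (s0 ++ [' ']) = pvCollapse s0 ++ [' '] :=
      pvCollapse_append s0 [' '] (by intro _; simp)
    have e2 : pvCollapse (s0 ++ [' '] ++ [')']) = pvCollapse s0 ++ [')'] := by
      rw [show s0 ++ [' '] ++ [')'] = s0 ++ [' ', ')'] from by simp]
      rw [pvCollapse_append s0 [' ', ')'] (by intro _; simp)]
      rfl
    rw [pvStep, if_pos ⟨rfl, by rw [hhead]; exact hc2⟩, e1, e2]
    simp
  · have e1 : pvCollapse (s ++ [c]) = pvCollapse s ++ [c] := by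
      apply pvCollapse_append s [c]
      intro hl hc'
      exact hc ⟨by simpa using hc', hl⟩
    rw [pvStep, if_neg (by rw [hhead]; intro ⟨h1, h2⟩; exact hc ⟨h1, h2⟩), e1]
    simp

theorem pvPush_collapse (cs : List Char) : ∀ (s : List Char),
    pvPush (pvCollapse s).reverse cs = (pvCollapse (s ++ cs)).reverse := by
  induction cs with
  | nil => intro s; simp [pvPush]
  | cons c cs ih =>
    intro s
    show pvPush (pvStep (pvCollapse s).reverse c) cs = _
    rw [pvStep_collapse]
    rw [ih (s ++ [c])]
    simp

-- python split: a string starting with the separator splits into "" plus the split of the rest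
theorem splitOn_go_acc (fuel : Nat) : ∀ (sep l cur : List Char) (acc : List (List Char)),
    PySem.Chars.splitOn.go sep fuel l cur acc = acc.reverse ++ PySem.Chars.splitOn.go sep fuel l cur [] := by
  induction fuel with
  | zero => intro sep l cur acc; simp [PySem.Chars.splitOn.go]
  | succ n ih =>
    intro sep l cur acc
    match l with
    | [] => simp [PySem.Chars.splitOn.go]
    | c :: t =>
      rw [PySem.Chars.splitOn.go, PySem.Chars.splitOn.go]
      by_cases hp : List.isPrefixOf sep (c :: t) = true
      · simp only [hp, if_true]
        rw [ih sep _ [] (cur.reverse :: acc), ih sep _ [] [cur.reverse]]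
        simp
      · simp only [hp, Bool.false_eq_true, if_false]
        rw [ih sep t (c :: cur) acc]

theorem splitOn_go_fuel (sep : List Char) (hsep : sep ≠ []) (fuel : Nat) : ∀ (fuel' : Nat) (l cur : List Char) (acc : List (List Char)),
    l.length < fuel → l.length < fuel' →
    PySem.Chars.splitOn.go sep fuel l cur acc = PySem.Chars.splitOn.go sep fuel' l cur acc := by
  induction fuel with
  | zero => intro fuel' l cur acc h; omega
  | succ n ih =>
    intro fuel' l cur acc h h'
    match fuel' with
    | 0 => omega
    | m + 1 =>
      match l with
      | [] =>
        rw [PySem.Chars.splitOn.go, PySem.Chars.splitOn.go]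
        all_goals omega
      | c :: t =>
        rw [PySem.Chars.splitOn.go, PySem.Chars.splitOn.go]
        by_cases hp : List.isPrefixOf sep (c :: t) = true
        · simp only [hp, if_true]
          apply ih
          · have : 1 ≤ sep.length := by cases sep with | nil => exact absurd rfl hsep | cons s ss => simp
            simp at h ⊢; omega
          · have : 1 ≤ sep.length := by cases sep with | nil => exact absurd rfl hsep | cons s ss => simp
            simp at h' ⊢; omega
        · simp only [hp, Bool.false_eq_true, if_false]
          apply ih <;> (simp at h h' ⊢; omega)

theorem splitOn_sep_prefix (sep x : List Char) (hsep : sep ≠ []) :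
    PySem.Chars.splitOn (sep ++ x) sep = [] :: PySem.Chars.splitOn x sep := by
  obtain ⟨s0, ss, rfl⟩ : ∃ s0 ss, sep = s0 :: ss := by
    cases sep with | nil => exact absurd rfl hsep | cons s0 ss => exact ⟨s0, ss, rfl⟩
  rw [PySem.Chars.splitOn, PySem.Chars.splitOn]
  rw [show (s0 :: ss) ++ x = s0 :: (ss ++ x) from rfl]
  rw [PySem.Chars.splitOn.go]
  have hp : List.isPrefixOf (s0 :: ss) (s0 :: (ss ++ x)) = true := by
    simp [List.isPrefixOf_iff_prefix]
  simp only [hp, if_true]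
  rw [show List.drop (s0 :: ss).length (s0 :: (ss ++ x)) = x from by simp]
  rw [splitOn_go_acc]
  simp only [List.reverse_cons, List.reverse_nil, List.nil_append]
  rw [List.singleton_append]
  congr 1
  apply splitOn_go_fuel (s0 :: ss) (by simp) (s0 :: (ss ++ x)).length (x.length + 1) x [] []
  · simp
  · omega

-- the prefix of l before its first occurrence of sep (all of l if sep does not occur)
def pvFirstTo (sep : List Char) : List Char → List Char
  | [] => []
  | c :: t => if sep.isPrefixOf (c :: t) then [] else c :: pvFirstTo sep t

theorem splitOn_go_head (sep : List Char) (fuel : Nat) : ∀ (l cur : List Char), l.length < fuel →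
    (PySem.Chars.splitOn.go sep fuel l cur []).getD 0 [] = cur.reverse ++ pvFirstTo sep l := by
  induction fuel with
  | zero => intro l cur h; omega
  | succ n ih =>
    intro l cur h
    match l with
    | [] => simp [PySem.Chars.splitOn.go, pvFirstTo]
    | c :: t =>
      rw [PySem.Chars.splitOn.go]
      by_cases hp : List.isPrefixOf sep (c :: t) = true
      · simp only [hp, if_true]
        rw [splitOn_go_acc]
        simp [pvFirstTo, hp]
      · simp only [hp, Bool.false_eq_true, if_false]
        rw [ih t (c :: cur) (by simpa using Nat.lt_of_succ_lt_succ h)]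
        simp [pvFirstTo, hp]

theorem splitOn_getD0 (l sep : List Char) :
    (PySem.Chars.splitOn l sep).getD 0 [] = pvFirstTo sep l := by
  rw [PySem.Chars.splitOn]
  simpa using splitOn_go_head sep (l.length + 1) l [] (by omega)

theorem pvFirstTo_dash (l : List Char) : pvFirstTo ['-'] l = l.takeWhile (· != '-') := by
  induction l with
  | nil => rfl
  | cons c t ih =>
    by_cases hc : c = '-'
    · subst hc; simp [pvFirstTo, List.isPrefixOf, List.takeWhile]
    · have h' : ¬ ('-' = c) := fun h => hc h.symm
      have hb : (c != '-') = true := by simp [hc]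
      simp [pvFirstTo, List.isPrefixOf, List.takeWhile, h', hb, ih]

theorem pvFirstTo_cons_ne_dash (c : Char) (t : List Char) (hc : ¬ c = '-') :
    pvFirstTo ['-'] (c :: t) = c :: pvFirstTo ['-'] t := by
  have h' : ¬ ('-' = c) := fun h => hc h.symm
  simp [pvFirstTo, List.isPrefixOf, h']

-- when "NT" does not occur before the first '-', truncating at the first "NT" does not change
-- the part before the first '-'
theorem pvFirstTo_NT (s : List Char) (h : ¬ (['N', 'T'] <:+: pvFirstTo ['-'] s)) :
    pvFirstTo ['-'] (pvFirstTo ['N', 'T'] s) = pvFirstTo ['-'] s := by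
  induction s with
  | nil => rfl
  | cons c t ih =>
    by_cases hNT : List.isPrefixOf ['N', 'T'] (c :: t) = true
    · exfalso
      obtain ⟨u, hu⟩ := List.isPrefixOf_iff_prefix.mp hNT
      injection hu with h1 h2
      subst h1; subst h2
      apply h
      simp only [List.append_eq, List.singleton_append]
      rw [pvFirstTo_cons_ne_dash 'N' _ (by decide), pvFirstTo_cons_ne_dash 'T' _ (by decide)]
      exact ⟨[], pvFirstTo ['-'] u, rfl⟩
    · rw [show pvFirstTo ['N', 'T'] (c :: t) = c :: pvFirstTo ['N', 'T'] t from by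
        simp [pvFirstTo, hNT]]
      by_cases hc : c = '-'
      · subst hc
        simp [pvFirstTo, List.isPrefixOf]
      · rw [pvFirstTo_cons_ne_dash c _ hc, pvFirstTo_cons_ne_dash c _ hc]
        rw [pvFirstTo_cons_ne_dash c t hc] at h
        rw [ih (fun hi => h (hi.trans (List.suffix_cons c _).isInfix))]

-- joining one more piece
theorem join_cons₂ (sep a x : List Char) (ys : List (List Char)) :
    PySem.Chars.join sep (a :: x :: ys) = a ++ sep ++ PySem.Chars.join sep (x :: ys) := by
  simp [PySem.Chars.join, List.intercalate]

theorem join_snoc (sep : List Char) (L : List (List Char)) (x : List Char) :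
    PySem.Chars.join sep (L ++ [x]) = PySem.Chars.join sep L ++ (if L = [] then [] else sep) ++ x := by
  induction L with
  | nil => simp [PySem.Chars.join, List.intercalate]
  | cons a L ih =>
    cases L with
    | nil => simp [PySem.Chars.join, List.intercalate]
    | cons b L' =>
      rw [show (a :: b :: L') ++ [x] = a :: ((b :: L') ++ [x]) from rfl]
      rw [show (b :: L') ++ [x] = b :: (L' ++ [x]) from rfl]
      rw [join_cons₂ sep a b (L' ++ [x]), show b :: (L' ++ [x]) = (b :: L') ++ [x] from rfl, ih]
      simp [join_cons₂]

-- the two label computations agree on a valid NT action whose label has no inner "NT"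
theorem split_dash_ofList (t : List Char) :
    (PySem.Str.split? (String.ofList t) "-").getD [] = List.map String.ofList (PySem.Chars.splitOn t ['-']) := by
  rw [PySem.Str.split?, String.toList_ofList]
  rw [show ("-" : String).toList = ['-'] from rfl]
  rw [PySem.Chars.split?, if_neg (by simp)]
  rfl

theorem sliceB (a : String) (e : Char) (r' : List Char) (h : a.toList = 'N' :: 'T' :: e :: r') :
    PySem.List.slice a.toList (some 2) (some (-1)) = (e :: r').dropLast := by
  rw [h]
  simp [PySem.List.slice, PySem.List.clampIdx, List.dropLast_eq_take]
  split_ifs <;> omega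

-- A's label chain, written as a pvFirstTo composition (unconditional)
theorem labelA_repr (a : String) (r : List Char) (h : a.toList = 'N' :: 'T' :: r) (hr : r ≠ []) :
    (PySem.List.pyGetD ((PySem.Str.split? (PySem.List.pyGetD ((PySem.Str.split? (PySem.Str.slice a none (some (-1))) "NT").getD []) 1 "") "-").getD []) 0 "").toList
      = pvFirstTo ['-'] (pvFirstTo ['N', 'T'] r.dropLast) := by
  obtain ⟨e, r', rfl⟩ : ∃ e r', r = e :: r' := by
    cases r with
    | nil => exact absurd rfl hr
    | cons e r' => exact ⟨e, r', rfl⟩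
  have hdrop : (PySem.Str.slice a none (some (-1))).toList = 'N' :: 'T' :: (e :: r').dropLast := by
    rw [PySem.Str.slice_to_neg_one, h]
    rfl
  have h1 : (PySem.Str.split? (PySem.Str.slice a none (some (-1))) "NT").getD []
      = List.map String.ofList ([] :: PySem.Chars.splitOn (e :: r').dropLast ['N', 'T']) := by
    rw [PySem.Str.split?]
    rw [show ("NT" : String).toList = ['N', 'T'] from rfl]
    rw [PySem.Chars.split?, if_neg (by simp)]
    rw [hdrop]
    rw [show ('N' :: 'T' :: (e :: r').dropLast) = ['N', 'T'] ++ (e :: r').dropLast from rfl]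
    rw [splitOn_sep_prefix ['N', 'T'] _ (by simp)]
    rfl
  rw [h1]
  rw [show ("" : String) = String.ofList [] from rfl]
  rw [PySem.List.pyGetD_map]
  rw [show PySem.List.pyGetD (([] : List Char) :: PySem.Chars.splitOn (e :: r').dropLast ['N', 'T']) 1 []
        = (PySem.Chars.splitOn (e :: r').dropLast ['N', 'T']).getD 0 [] from by
      rw [PySem.List.pyGetD_ofNat']
      cases PySem.Chars.splitOn (e :: r').dropLast ['N', 'T'] <;> rfl]
  rw [split_dash_ofList, PySem.List.pyGetD_map, String.toList_ofList]
  rw [show PySem.List.pyGetD (PySem.Chars.splitOn ((PySem.Chars.splitOn (e :: r').dropLast ['N', 'T']).getD 0 []) ['-']) 0 []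
        = (PySem.Chars.splitOn ((PySem.Chars.splitOn (e :: r').dropLast ['N', 'T']).getD 0 []) ['-']).getD 0 [] from by
      rw [PySem.List.pyGetD_ofNat']]
  rw [splitOn_getD0, splitOn_getD0]

-- outside the change region the two label computations agree (as strings)
theorem label_eq (a : String) (r : List Char) (h : a.toList = 'N' :: 'T' :: r) (hr : r ≠ [])
    (hni : ¬ (['N', 'T'] <:+: ((a.toList.drop 2).dropLast.takeWhile (· != '-')))) :
    PySem.List.pyGetD ((PySem.Str.split? (PySem.List.pyGetD ((PySem.Str.split? (PySem.Str.slice a none (some (-1))) "NT").getD []) 1 "") "-").getD []) 0 ""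
      = String.ofList ((PySem.Chars.splitOn (PySem.List.slice a.toList (some 2) (some (-1))) ['-']).getD 0 []) := by
  obtain ⟨e, r', rfl⟩ : ∃ e r', r = e :: r' := by
    cases r with
    | nil => exact absurd rfl hr
    | cons e r' => exact ⟨e, r', rfl⟩
  have hni' : ¬ (['N', 'T'] <:+: pvFirstTo ['-'] (e :: r').dropLast) := by
    rw [pvFirstTo_dash]
    rw [h] at hni
    simpa using hni
  apply String.toList_inj.mp
  rw [labelA_repr a (e :: r') h hr, String.toList_ofList, sliceB a e r' h, splitOn_getD0]
  exact pvFirstTo_NT _ hni'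

theorem pushPiece (L : List (List Char)) (pc : List Char) :
    pvPush (if L.isEmpty then (pvCollapse (PySem.Chars.join [' '] L)).reverse else ' ' :: (pvCollapse (PySem.Chars.join [' '] L)).reverse) pc
      = (pvCollapse (PySem.Chars.join [' '] (L ++ [pc]))).reverse := by
  by_cases hL : L = []
  · subst hL
    rw [if_pos (by simp)]
    rw [show PySem.Chars.join [' '] ([] ++ [pc]) = pc from by simp [PySem.Chars.join, List.intercalate]]
    rw [show (PySem.Chars.join [' '] [] : List Char) = [] from rfl]
    simpa using pvPush_collapse pc []
  · rw [if_neg (by simpa using hL)]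
    rw [join_snoc [' '] L pc, if_neg hL]
    have e1 : pvCollapse (PySem.Chars.join [' '] L ++ [' ']) = pvCollapse (PySem.Chars.join [' '] L) ++ [' '] :=
      pvCollapse_append _ [' '] (by intro _; simp)
    have e2 := pvPush_collapse pc (PySem.Chars.join [' '] L ++ [' '])
    rw [e1] at e2
    rw [show ' ' :: (pvCollapse (PySem.Chars.join [' '] L)).reverse = (pvCollapse (PySem.Chars.join [' '] L) ++ [' ']).reverse from by simp]
    rw [e2, List.append_assoc]

theorem pushPiece' (tree : List String) (pc : List Char) :
    pvPush (if tree.isEmpty then (pvCollapse (PySem.Chars.join [' '] (tree.map String.toList))).reverse else ' ' :: (pvCollapse (PySem.Chars.join [' '] (tree.map String.toList))).reverse) pc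
      = (pvCollapse (PySem.Chars.join [' '] ((tree.map String.toList) ++ [pc]))).reverse := by
  have h := pushPiece (tree.map String.toList) pc
  cases tree <;> simpa using h

-- an intermediate step function: A's fold shape with B's label computation
def pvStepA2 (sent : List String) (tags : List String) (st : Int × List String) (action : String) : Int × List String :=
  if PySem.Str.slice action none (some 2) = "NT" then
    (st.1, st.2 ++ [String.ofList ((PySem.Chars.splitOn (PySem.List.slice action.toList (some 2) (some (-1))) ['-']).getD 0 [])])
  else if action = "REDUCE" then
    (st.1, st.2 ++ [")"])
  else if action = "SHIFT" then
    (st.1 + 1, st.2 ++ [String.ofList (['('] ++ (PySem.List.pyGetD tags st.1 "").toList ++ [' '] ++ (PySem.List.pyGetD sent st.1 "").toList ++ [')'])])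
  else (st.1, st.2)

theorem nt_shape (a : String) (hlen : 3 ≤ a.toList.length) (htake : a.toList.take 2 = ['N', 'T']) :
    ∃ r, a.toList = 'N' :: 'T' :: r ∧ r ≠ [] := by
  rcases hx : a.toList with _ | ⟨x, _ | ⟨y, _ | ⟨z, l⟩⟩⟩
  · rw [hx] at hlen; simp at hlen
  · rw [hx] at hlen; simp at hlen
  · rw [hx] at hlen; simp at hlen
  · rw [hx] at htake
    simp at htake
    exact ⟨z :: l, by rw [htake.1, htake.2], by simp⟩

theorem nt_slice (a : String) (r : List Char) (htl : a.toList = 'N' :: 'T' :: r) :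
    PySem.Str.slice a none (some 2) = "NT" := by
  apply String.toList_inj.mp
  rw [show (PySem.Str.slice a none (some 2)).toList = PySem.Chars.slice a.toList none (some 2) from by
    rw [PySem.Str.slice, String.toList_ofList]]
  rw [PySem.Chars.slice_eq_listSlice, PySem.List.slice_to a.toList (by decide : (0:Int) ≤ (2:Int)), htl]
  rfl

theorem nt_ne_shift (a : String) (r : List Char) (htl : a.toList = 'N' :: 'T' :: r) : a ≠ "SHIFT" := by
  intro heq
  rw [heq, show ("SHIFT" : String).toList = ['S', 'H', 'I', 'F', 'T'] from rfl] at htl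
  simp at htl

theorem nt_ne_reduce (a : String) (r : List Char) (htl : a.toList = 'N' :: 'T' :: r) : a ≠ "REDUCE" := by
  intro heq
  rw [heq, show ("REDUCE" : String).toList = ['R', 'E', 'D', 'U', 'C', 'E'] from rfl] at htl
  simp at htl

theorem stepAB (sent tags : List String) (p : Int) (tree : List String) (a : String)
    (hv : a = "SHIFT" ∨ a = "REDUCE" ∨ (3 ≤ a.toList.length ∧ a.toList.take 2 = ['N', 'T'])) :
    pvStepB sent tags (p, (pvCollapse (PySem.Chars.join [' '] (tree.map String.toList))).reverse, tree.isEmpty) a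
      = ((pvStepA2 sent tags (p, tree) a).1,
         (pvCollapse (PySem.Chars.join [' '] ((pvStepA2 sent tags (p, tree) a).2.map String.toList))).reverse,
         (pvStepA2 sent tags (p, tree) a).2.isEmpty) := by
  rcases hv with rfl | rfl | ⟨hlen, htake⟩
  · -- SHIFT
    simp only [pvStepA2, pvStepB]
    rw [if_neg (show ¬((PySem.Str.slice "SHIFT" none (some 2)) = "NT") from by decide)]
    simp only [String.reduceEq, reduceIte, Prod.mk.injEq]
    refine ⟨by trivial, ?_, by simp⟩
    rw [List.map_append, List.map_cons, List.map_nil, String.toList_ofList]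
    exact pushPiece' tree _
  · -- REDUCE
    simp only [pvStepA2, pvStepB]
    rw [if_neg (show ¬((PySem.Str.slice "REDUCE" none (some 2)) = "NT") from by decide)]
    simp only [String.reduceEq, reduceIte, Prod.mk.injEq]
    refine ⟨by trivial, ?_, by simp⟩
    rw [List.map_append, List.map_cons, List.map_nil]
    rw [show (")" : String).toList = [')'] from rfl]
    exact pushPiece' tree _
  · -- NT action
    obtain ⟨r, htl, hrne⟩ := nt_shape a hlen htake
    simp only [pvStepA2, pvStepB]
    rw [if_pos (nt_slice a r htl), if_neg (nt_ne_shift a r htl), if_neg (nt_ne_reduce a r htl)]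
    simp only [Prod.mk.injEq]
    refine ⟨by trivial, ?_, by simp⟩
    rw [List.map_append, List.map_cons, List.map_nil, String.toList_ofList]
    exact pushPiece' tree _

theorem fold_rel (sent tags : List String) (acts : List String)
    (hv : ∀ a ∈ acts, a = "SHIFT" ∨ a = "REDUCE" ∨ (3 ≤ a.toList.length ∧ a.toList.take 2 = ['N', 'T'])) :
    ∀ (p : Int) (tree : List String),
    acts.foldl (pvStepB sent tags) (p, (pvCollapse (PySem.Chars.join [' '] (tree.map String.toList))).reverse, tree.isEmpty)
      = ((acts.foldl (pvStepA2 sent tags) (p, tree)).1,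
         (pvCollapse (PySem.Chars.join [' '] ((acts.foldl (pvStepA2 sent tags) (p, tree)).2.map String.toList))).reverse,
         (acts.foldl (pvStepA2 sent tags) (p, tree)).2.isEmpty) := by
  induction acts with
  | nil => intro p tree; simp
  | cons a acts ih =>
    intro p tree
    have ha := hv a (by simp)
    have htl : ∀ b ∈ acts, b = "SHIFT" ∨ b = "REDUCE" ∨ (3 ≤ b.toList.length ∧ b.toList.take 2 = ['N', 'T']) :=
      fun b hb => hv b (by simp [hb])
    simp only [List.foldl_cons]
    rw [stepAB sent tags p tree a ha]
    exact ih htl (pvStepA2 sent tags (p, tree) a).1 (pvStepA2 sent tags (p, tree) a).2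

-- output characterizations of the two ports
theorem a_char (sent tags actions : List String) :
    (get_nonbinary_tree sent tags actions).toList
      = pvCollapse (PySem.Chars.join [' '] (((actions.foldl (pvStepA sent tags) ((0 : Int), ([] : List String))).2).map String.toList)) := by
  unfold get_nonbinary_tree
  rw [PySem.Str.toList_replace, PySem.Str.toList_join]
  rw [show (" )" : String).toList = [' ', ')'] from rfl, show (")" : String).toList = [')'] from rfl]
  rw [show (" " : String).toList = [' '] from rfl]
  exact replace_eq_collapse _

theorem alt_char (sent tags actions : List String)
    (hv : ∀ a ∈ actions, a = "SHIFT" ∨ a = "REDUCE" ∨ (3 ≤ a.toList.length ∧ a.toList.take 2 = ['N', 'T'])) :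
    (get_nonbinary_tree_alt sent tags actions).toList
      = pvCollapse (PySem.Chars.join [' '] (((actions.foldl (pvStepA2 sent tags) ((0 : Int), ([] : List String))).2).map String.toList)) := by
  unfold get_nonbinary_tree_alt
  have h := fold_rel sent tags actions hv 0 []
  simp only [List.map_nil, List.isEmpty_nil] at h
  rw [show (PySem.Chars.join [' '] [] : List Char) = [] from rfl] at h
  rw [show (pvCollapse [] : List Char) = [] from rfl] at h
  simp only [List.reverse_nil] at h
  rw [h]
  simp only [List.reverse_reverse, String.toList_ofList]

-- outside the change region, A's step equals the intermediate step
theorem stepA_eq (sent tags : List String) (st : Int × List String) (a : String)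
    (hv : a = "SHIFT" ∨ a = "REDUCE" ∨ (3 ≤ a.toList.length ∧ a.toList.take 2 = ['N', 'T']))
    (hni : a.toList.take 2 = ['N', 'T'] → ¬ (['N', 'T'] <:+: ((a.toList.drop 2).dropLast.takeWhile (· != '-')))) :
    pvStepA sent tags st a = pvStepA2 sent tags st a := by
  rcases hv with rfl | rfl | ⟨hlen, htake⟩
  · simp only [pvStepA, pvStepA2]
    split_ifs with h
    · exact absurd h (by decide)
    all_goals rfl
  · simp only [pvStepA, pvStepA2]
    split_ifs with h
    · exact absurd h (by decide)
    all_goals rfl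
  · obtain ⟨r, htl, hrne⟩ := nt_shape a hlen htake
    simp only [pvStepA, pvStepA2, nt_slice a r htl, reduceIte]
    rw [label_eq a r htl hrne (hni htake)]

set_option maxHeartbeats 1600000 in
theorem fold_congr (sent tags : List String) (acts : List String)
    (hv : ∀ a ∈ acts, a = "SHIFT" ∨ a = "REDUCE" ∨ (3 ≤ a.toList.length ∧ a.toList.take 2 = ['N', 'T']))
    (hnd : ∀ a ∈ acts, a.toList.take 2 = ['N', 'T'] → ¬ (['N', 'T'] <:+: ((a.toList.drop 2).dropLast.takeWhile (· != '-')))) :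
    ∀ (st : Int × List String),
    acts.foldl (pvStepA sent tags) st = acts.foldl (pvStepA2 sent tags) st := by
  induction acts with
  | nil => intro st; simp only [List.foldl_nil]
  | cons a acts ih =>
    intro st
    simp only [List.foldl_cons]
    rw [stepA_eq sent tags st a (hv a (by simp)) (hnd a (by simp))]
    exact ih (fun b hb => hv b (by simp [hb])) (fun b hb => hnd b (by simp [hb])) _

-- ===== counting 'N' characters: the tightness argument =====
def pvSumN (l : List String) : Nat := (l.map (fun s => s.toList.count 'N')).sum

theorem pvSumN_append (x y : List String) : pvSumN (x ++ y) = pvSumN x + pvSumN y := by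
  simp [pvSumN]

theorem count_pvCollapse (l : List Char) : (pvCollapse l).count 'N' = l.count 'N' := by
  induction l using pvCollapse.induct with
  | case1 => rfl
  | case2 c => rfl
  | case3 a b r hab ih =>
    obtain ⟨ha, hb⟩ := hab; subst ha; subst hb
    rw [show pvCollapse (' ' :: ')' :: r) = ')' :: pvCollapse r from by simp [pvCollapse]]
    simp [List.count_cons, ih]
  | case4 a b r hab ih =>
    rw [pvCollapse_cons_of a (b :: r) (by intro ⟨h1, h2⟩; exact hab ⟨h1, by simpa using h2⟩)]
    simp only [List.count_cons, ih]

theorem count_join (Ls : List (List Char)) :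
    (PySem.Chars.join [' '] Ls).count 'N' = (Ls.map (List.count 'N')).sum := by
  induction Ls with
  | nil => simp [PySem.Chars.join, List.intercalate]
  | cons a Ls ih =>
    cases Ls with
    | nil => simp [PySem.Chars.join, List.intercalate]
    | cons b L' =>
      rw [join_cons₂]
      simp only [List.count_append, ih, List.map_cons, List.sum_cons]
      simp [List.count_cons]

theorem count_le (s : List Char) :
    (pvFirstTo ['-'] (pvFirstTo ['N', 'T'] s)).count 'N' ≤ (pvFirstTo ['-'] s).count 'N' := by
  induction s with
  | nil => simp [pvFirstTo]
  | cons c t ih =>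
    by_cases hNT : List.isPrefixOf ['N', 'T'] (c :: t) = true
    · rw [show pvFirstTo ['N', 'T'] (c :: t) = [] from by simp [pvFirstTo, hNT]]
      simp [pvFirstTo]
    · rw [show pvFirstTo ['N', 'T'] (c :: t) = c :: pvFirstTo ['N', 'T'] t from by simp [pvFirstTo, hNT]]
      by_cases hc : c = '-'
      · subst hc; simp [pvFirstTo, List.isPrefixOf]
      · rw [pvFirstTo_cons_ne_dash c _ hc, pvFirstTo_cons_ne_dash c t hc]
        simp only [List.count_cons]
        exact Nat.add_le_add_right ih _

theorem count_lt (s : List Char) (h : ['N', 'T'] <:+: pvFirstTo ['-'] s) :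
    (pvFirstTo ['-'] (pvFirstTo ['N', 'T'] s)).count 'N' < (pvFirstTo ['-'] s).count 'N' := by
  induction s with
  | nil => simp [pvFirstTo] at h
  | cons c t ih =>
    by_cases hNT : List.isPrefixOf ['N', 'T'] (c :: t) = true
    · obtain ⟨u, hu⟩ := List.isPrefixOf_iff_prefix.mp hNT
      injection hu with h1 h2
      subst h1; subst h2
      rw [show pvFirstTo ['N', 'T'] ('N' :: ['T'].append u) = [] from by simp [pvFirstTo, hNT]]
      simp only [List.append_eq, List.singleton_append]
      rw [pvFirstTo_cons_ne_dash 'N' _ (by decide), pvFirstTo_cons_ne_dash 'T' _ (by decide)]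
      simp [pvFirstTo, List.count_cons]
    · have hstep : pvFirstTo ['N', 'T'] (c :: t) = c :: pvFirstTo ['N', 'T'] t := by
        simp [pvFirstTo, hNT]
      by_cases hc : c = '-'
      · subst hc
        rw [show pvFirstTo ['-'] ('-' :: t) = [] from by simp [pvFirstTo, List.isPrefixOf]] at h
        simp at h
      · rw [pvFirstTo_cons_ne_dash c t hc] at h
        rcases List.infix_cons_iff.mp h with hpre | hinf
        · exfalso
          obtain ⟨u, hu⟩ := hpre
          injection hu with e1 e2
          subst e1
          cases t with
          | nil => simp [pvFirstTo] at e2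
          | cons d t' =>
            by_cases hd : d = '-'
            · subst hd
              rw [show pvFirstTo ['-'] ('-' :: t') = [] from by simp [pvFirstTo, List.isPrefixOf]] at e2
              simp at e2
            · rw [pvFirstTo_cons_ne_dash d t' hd] at e2
              injection e2 with e3 _
              subst e3
              exact hNT (by simp [List.isPrefixOf])
        · rw [hstep, pvFirstTo_cons_ne_dash c _ hc, pvFirstTo_cons_ne_dash c t hc]
          simp only [List.count_cons]
          exact Nat.add_lt_add_right (ih hinf) _

theorem stepA_ptr (sent tags : List String) (st : Int × List String) (a : String) :
    (pvStepA sent tags st a).1 = (pvStepA2 sent tags st a).1 := by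
  unfold pvStepA pvStepA2
  split_ifs <;> rfl

theorem stepA_snd (sent tags : List String) (p : Int) (t : List String) (a : String) :
    pvStepA sent tags (p, t) a = ((pvStepA sent tags (p, []) a).1, t ++ (pvStepA sent tags (p, []) a).2) := by
  unfold pvStepA
  split_ifs <;> simp

theorem stepA2_snd (sent tags : List String) (p : Int) (t : List String) (a : String) :
    pvStepA2 sent tags (p, t) a = ((pvStepA2 sent tags (p, []) a).1, t ++ (pvStepA2 sent tags (p, []) a).2) := by
  unfold pvStepA2
  split_ifs <;> simp

theorem foldA_decomp (sent tags : List String) (acts : List String) : ∀ (p : Int) (t : List String),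
    acts.foldl (pvStepA sent tags) (p, t)
      = ((acts.foldl (pvStepA sent tags) (p, [])).1, t ++ (acts.foldl (pvStepA sent tags) (p, [])).2) := by
  induction acts with
  | nil => intro p t; simp
  | cons a acts ih =>
    intro p t
    simp only [List.foldl_cons]
    rw [stepA_snd sent tags p t a]
    rw [ih (pvStepA sent tags (p, []) a).1 (t ++ (pvStepA sent tags (p, []) a).2)]
    conv_rhs =>
      rw [show pvStepA sent tags (p, []) a = ((pvStepA sent tags (p, []) a).1, (pvStepA sent tags (p, []) a).2) from rfl,
        ih (pvStepA sent tags (p, []) a).1 (pvStepA sent tags (p, []) a).2]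
    simp

theorem foldA2_decomp (sent tags : List String) (acts : List String) : ∀ (p : Int) (t : List String),
    acts.foldl (pvStepA2 sent tags) (p, t)
      = ((acts.foldl (pvStepA2 sent tags) (p, [])).1, t ++ (acts.foldl (pvStepA2 sent tags) (p, [])).2) := by
  induction acts with
  | nil => intro p t; simp
  | cons a acts ih =>
    intro p t
    simp only [List.foldl_cons]
    rw [stepA2_snd sent tags p t a]
    rw [ih (pvStepA2 sent tags (p, []) a).1 (t ++ (pvStepA2 sent tags (p, []) a).2)]
    conv_rhs =>
      rw [show pvStepA2 sent tags (p, []) a = ((pvStepA2 sent tags (p, []) a).1, (pvStepA2 sent tags (p, []) a).2) from rfl,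
        ih (pvStepA2 sent tags (p, []) a).1 (pvStepA2 sent tags (p, []) a).2]
    simp

-- the single piece appended for one action: counts compare, strictly on a change-region action
theorem head_counts (sent tags : List String) (p : Int) (a : String)
    (hv : a = "SHIFT" ∨ a = "REDUCE" ∨ (3 ≤ a.toList.length ∧ a.toList.take 2 = ['N', 'T'])) :
    pvSumN (pvStepA sent tags (p, []) a).2 ≤ pvSumN (pvStepA2 sent tags (p, []) a).2 ∧
    ((a.toList.take 2 = ['N', 'T'] ∧ ['N', 'T'] <:+: ((a.toList.drop 2).dropLast.takeWhile (· != '-'))) →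
      pvSumN (pvStepA sent tags (p, []) a).2 < pvSumN (pvStepA2 sent tags (p, []) a).2) := by
  rcases hv with rfl | rfl | ⟨hlen, htake⟩
  · have he : pvStepA sent tags (p, []) "SHIFT" = pvStepA2 sent tags (p, []) "SHIFT" := by
      unfold pvStepA pvStepA2
      rw [if_neg (show ¬((PySem.Str.slice "SHIFT" none (some 2)) = "NT") from by decide)]
      rfl
    rw [he]
    exact ⟨le_refl _, by rintro ⟨h1, _⟩; exact absurd h1 (by decide)⟩
  · have he : pvStepA sent tags (p, []) "REDUCE" = pvStepA2 sent tags (p, []) "REDUCE" := by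
      simp only [pvStepA, pvStepA2]
      split_ifs with h
      · exact absurd h (by decide)
      all_goals rfl
    rw [he]
    exact ⟨le_refl _, by rintro ⟨h1, _⟩; exact absurd h1 (by decide)⟩
  · obtain ⟨r, htl, hrne⟩ := nt_shape a hlen htake
    obtain ⟨e, r', rfl⟩ : ∃ e r', r = e :: r' := by
      cases r with
      | nil => exact absurd rfl hrne
      | cons e r' => exact ⟨e, r', rfl⟩
    have e1 : (pvStepA sent tags (p, []) a).2
        = [PySem.List.pyGetD ((PySem.Str.split? (PySem.List.pyGetD ((PySem.Str.split? (PySem.Str.slice a none (some (-1))) "NT").getD []) 1 "") "-").getD []) 0 ""] := by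
      simp only [pvStepA, nt_slice a _ htl, reduceIte, List.nil_append]
    have e2 : (pvStepA2 sent tags (p, []) a).2
        = [String.ofList ((PySem.Chars.splitOn (PySem.List.slice a.toList (some 2) (some (-1))) ['-']).getD 0 [])] := by
      simp only [pvStepA2, nt_slice a _ htl, reduceIte, List.nil_append]
    rw [e1, e2]
    have hA : pvSumN [PySem.List.pyGetD ((PySem.Str.split? (PySem.List.pyGetD ((PySem.Str.split? (PySem.Str.slice a none (some (-1))) "NT").getD []) 1 "") "-").getD []) 0 ""]
        = (pvFirstTo ['-'] (pvFirstTo ['N', 'T'] (e :: r').dropLast)).count 'N' := by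
      simp only [pvSumN, List.map_cons, List.map_nil, List.sum_cons, List.sum_nil, Nat.add_zero]
      rw [labelA_repr a (e :: r') htl hrne]
    have hA2 : pvSumN [String.ofList ((PySem.Chars.splitOn (PySem.List.slice a.toList (some 2) (some (-1))) ['-']).getD 0 [])]
        = (pvFirstTo ['-'] (e :: r').dropLast).count 'N' := by
      simp only [pvSumN, List.map_cons, List.map_nil, List.sum_cons, List.sum_nil, Nat.add_zero]
      rw [String.toList_ofList, sliceB a e r' htl, splitOn_getD0]
    constructor
    · rw [hA, hA2]
      exact count_le _
    · rintro ⟨_, hinf⟩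
      rw [hA, hA2]
      apply count_lt
      rw [htl] at hinf
      rw [pvFirstTo_dash]
      simpa using hinf

set_option maxHeartbeats 1600000 in
theorem fold_counts (sent tags : List String) (acts : List String)
    (hv : ∀ a ∈ acts, a = "SHIFT" ∨ a = "REDUCE" ∨ (3 ≤ a.toList.length ∧ a.toList.take 2 = ['N', 'T'])) :
    ∀ (p : Int),
    pvSumN (acts.foldl (pvStepA sent tags) (p, [])).2 ≤ pvSumN (acts.foldl (pvStepA2 sent tags) (p, [])).2 ∧
    ((∃ a ∈ acts, a.toList.take 2 = ['N', 'T'] ∧ ['N', 'T'] <:+: ((a.toList.drop 2).dropLast.takeWhile (· != '-'))) →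
      pvSumN (acts.foldl (pvStepA sent tags) (p, [])).2 < pvSumN (acts.foldl (pvStepA2 sent tags) (p, [])).2) := by
  induction acts with
  | nil =>
    intro p
    simp only [List.foldl_nil]
    refine ⟨le_refl _, ?_⟩
    rintro ⟨a, ha, _⟩
    simp at ha
  | cons a acts ih =>
    intro p
    have ha := hv a (by simp)
    have ihs := ih (fun b hb => hv b (by simp [hb])) (pvStepA sent tags (p, []) a).1
    obtain ⟨hhle, hhlt⟩ := head_counts sent tags p a ha
    simp only [List.foldl_cons]
    rw [show pvStepA sent tags (p, []) a = ((pvStepA sent tags (p, []) a).1, (pvStepA sent tags (p, []) a).2) from rfl]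
    rw [show pvStepA2 sent tags (p, []) a = ((pvStepA2 sent tags (p, []) a).1, (pvStepA2 sent tags (p, []) a).2) from rfl]
    rw [foldA_decomp, foldA2_decomp, ← stepA_ptr sent tags (p, []) a]
    simp only [pvSumN_append]
    obtain ⟨hle, hlt⟩ := ihs
    constructor
    · exact Nat.add_le_add hhle hle
    · rintro ⟨b, hb, hbc⟩
      rcases List.mem_cons.mp hb with rfl | hb'
      · exact Nat.add_lt_add_of_lt_of_le (hhlt hbc) hle
      · exact Nat.add_lt_add_of_le_of_lt hhle (hlt ⟨b, hb', hbc⟩)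

-- ===== VERDICT (by name: the statement is the Claim_ definition above) =====
theorem get_nonbinary_tree_spec : Claim_unchanged_get_nonbinary_tree := by
  intro sent tags actions _ hpre
  unfold Spec_get_nonbinary_tree
  intro hD
  have hnd : ∀ a ∈ actions, a.toList.take 2 = ['N', 'T'] → ¬ (['N', 'T'] <:+: ((a.toList.drop 2).dropLast.takeWhile (· != '-'))) := by
    intro a ha h2 hi
    exact hD ⟨a, ha, h2, hi⟩
  apply String.toList_inj.mp
  rw [a_char, alt_char sent tags actions hpre.1]
  rw [fold_congr sent tags actions hpre.1 hnd]

theorem get_nonbinary_tree_changed : Claim_changed_get_nonbinary_tree := by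
  unfold Claim_changed_get_nonbinary_tree; decide

theorem get_nonbinary_tree_tight : Claim_exact_get_nonbinary_tree := by
  intro sent tags actions _ hpre hD heq
  have hcnt := congrArg (fun s => s.toList.count 'N') heq
  simp only [a_char, alt_char sent tags actions hpre.1] at hcnt
  rw [count_pvCollapse, count_pvCollapse, count_join, count_join] at hcnt
  simp only [List.map_map] at hcnt
  have hlt := (fold_counts sent tags actions hpre.1 0).2 hD
  simp only [pvSumN, Function.comp_def] at hlt hcnt
  omega
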